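-- pv_equiv track=rewrite | github.com/rybak/ML-2015 | Association_rules/ml.py | aggregate_baskets
-- ===== SOURCE A (Python) =====
-- def aggregate_baskets(data):
--     # aggregating data in baskets (aka transactions)
--     baskets = {}  # empty dictionary
--     products = set() # empty set
--     for (name, category, department, basket_id) in data:
--         baskets.setdefault(basket_id, [])
--         product = (name, category, department)
--         products.add(product)
--         baskets[basket_id].append(product)
--     return baskets, products
-- ===== SOURCE B (Python) =====
-- def aggregate_baskets(data):
--     # B: no incremental dict -- ordered distinct basket ids via dict.fromkeys,
--     # then one filtering scan per id (nested scans), products as a set comprehension.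
--     ids = list(dict.fromkeys(bid for (_, _, _, bid) in data))
--     baskets = {i: [(n, c, d) for (n, c, d, b) in data if b == i] for i in ids}
--     products = {(n, c, d) for (n, c, d, _) in data}
--     return (baskets, products)
-- ===== Notes on version B (the rewrite author's own statement) =====
-- stated objective: alternative
-- what changed: B drops A's single-pass incremental dict (setdefault/append/set.add): it first computes the ordered distinct basket ids with dict.fromkeys, then builds each basket by an independent filtering scan of the rows for that id, and products by one set comprehension -- nested scans instead of one accumulating loop.
import Mathlib
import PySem

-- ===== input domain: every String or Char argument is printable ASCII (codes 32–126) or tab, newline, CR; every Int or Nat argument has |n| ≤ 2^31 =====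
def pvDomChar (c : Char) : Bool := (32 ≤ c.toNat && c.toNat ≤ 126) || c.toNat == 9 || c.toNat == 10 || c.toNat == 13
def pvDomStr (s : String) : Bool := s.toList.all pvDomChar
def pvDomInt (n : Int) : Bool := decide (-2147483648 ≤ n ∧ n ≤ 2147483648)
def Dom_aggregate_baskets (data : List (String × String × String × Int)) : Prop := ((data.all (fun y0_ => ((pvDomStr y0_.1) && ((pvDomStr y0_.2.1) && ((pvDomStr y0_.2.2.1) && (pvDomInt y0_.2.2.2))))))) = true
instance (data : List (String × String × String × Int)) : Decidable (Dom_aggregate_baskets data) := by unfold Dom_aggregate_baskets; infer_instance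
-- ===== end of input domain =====

-- B replaces A's single accumulating pass (setdefault/append/set.add) with nested scans: ordered
-- distinct basket ids via dict.fromkeys, one filtering pass per id, products as one set comprehension
-- (objective: alternative decomposition, not faster).


-- ===== PORT A =====
-- one loop over data: setdefault, add the product to the set, append it to the basket
def aggregate_baskets (data : List (String × String × String × Int)) : (List (Int × List (String × String × String))) × (List (String × String × String)) :=
  let res := data.foldl
    (fun (acc : PySem.Dict Int (List (String × String × String)) × PySem.Set (String × String × String)) row =>
      match row with
      | (name, category, department, basket_id) =>
        let baskets := acc.1.setdefault basket_id []
        let product := (name, category, department)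
        let products := PySem.Set.add acc.2 product
        -- baskets[basket_id].append(product)
        let baskets := baskets.modify basket_id [] (fun l => l ++ [product])
        (baskets, products))
    (PySem.Dict.empty, PySem.Set.empty)
  (res.1.items, res.2)

-- ===== PORT B =====
-- ids = list(dict.fromkeys(...)); dict comprehension with a filter per id; set comprehension
def aggregate_baskets_alt (data : List (String × String × String × Int)) : (List (Int × List (String × String × String))) × (List (String × String × String)) :=
  let ids := PySem.List.dedup (data.map (fun r => r.2.2.2))
  let baskets := ids.map (fun i =>
    (i, (data.filter (fun r => r.2.2.2 == i)).map (fun r => (r.1, r.2.1, r.2.2.1))))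
  let products := PySem.Set.ofList (data.map (fun r => (r.1, r.2.1, r.2.2.1)))
  (baskets, products)

-- ===== PRECONDITION & SPEC =====
def Spec_aggregate_baskets (data : List (String × String × String × Int)) (out : (List (Int × List (String × String × String))) × (List (String × String × String))) : Prop := out = aggregate_baskets_alt data
instance (data : List (String × String × String × Int)) (out : (List (Int × List (String × String × String))) × (List (String × String × String))) : Decidable (Spec_aggregate_baskets data out) := by unfold Spec_aggregate_baskets; infer_instance

-- ===== CLAIM (what is proved, stated in full; the proofs are below) =====
def Claim_equal_aggregate_baskets : Prop := ∀ (data : List (String × String × String × Int)), Dom_aggregate_baskets data → Spec_aggregate_baskets data (aggregate_baskets data)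

-- ===== LEMMAS AND PROOFS =====

-- setdefault(k, v) followed by modify with the same default is just the modify
theorem setdefault_modify {κ ν : Type} [BEq κ] [LawfulBEq κ] (d : PySem.Dict κ ν) (k : κ) (v : ν) (f : ν → ν) :
    (d.setdefault k v).modify k v f = d.modify k v f := by
  unfold PySem.Dict.setdefault
  by_cases hc : d.contains k = true
  · simp [hc]
  · have hfind : d.items.find? (fun p => p.1 == k) = none := by
      rw [List.find?_eq_none]
      intro p hp
      simp only [beq_iff_eq]
      intro h
      exact hc (List.any_eq_true.mpr ⟨p, hp, by simp [h]⟩)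
    have hmap : List.map (fun p => if (p.1 == k) = true then (k, f v) else p) d.items = d.items := by
      conv_rhs => rw [← List.map_id d.items]
      exact List.map_congr_left (fun p hp => by
        have h2 := List.find?_eq_none.mp hfind p hp
        simp only [beq_iff_eq] at h2
        simp [h2])
    have hc' : ∀ x : ν, (k, x) ∉ d.items := by simpa [PySem.Dict.contains] using hc
    rw [if_neg hc]
    unfold PySem.Dict.modify PySem.Dict.insert PySem.Dict.getD PySem.Dict.get? PySem.Dict.contains
    simp [hfind, List.find?_append, List.any_append, List.map_append, hmap, hc']

-- a fold over a pair whose components never interact is the pair of the component folds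
theorem foldl_pair {α β γ : Type} (f : α → γ → α) (g : β → γ → β) (a : α) (b : β) (xs : List γ) :
    xs.foldl (fun p x => (f p.1 x, g p.2 x)) (a, b) = (xs.foldl f a, xs.foldl g b) := by
  induction xs generalizing a b with
  | nil => rfl
  | cons h t ih => simp [List.foldl_cons, ih]

-- the items of A's modify-append grouping loop are B's nested-scan grouping
theorem items_group_loop (data : List (String × String × String × Int)) :
    (data.foldl
      (fun (d : PySem.Dict Int (List (String × String × String))) (row : String × String × String × Int) =>
        d.modify row.2.2.2 [] (fun l => l ++ [(row.1, row.2.1, row.2.2.1)]))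
      PySem.Dict.empty).items
    = (PySem.List.dedup (data.map (fun r => r.2.2.2))).map (fun i =>
        (i, (data.filter (fun r => r.2.2.2 == i)).map (fun r => (r.1, r.2.1, r.2.2.1)))) := by
  have hfold : data.foldl
      (fun (d : PySem.Dict Int (List (String × String × String))) (row : String × String × String × Int) =>
        d.modify row.2.2.2 [] (fun l => l ++ [(row.1, row.2.1, row.2.2.1)]))
      PySem.Dict.empty
    = (data.map (fun r => (r.2.2.2, (r.1, r.2.1, r.2.2.1)))).foldl
      (fun (d : PySem.Dict Int (List (String × String × String))) (p : Int × String × String × String) => d.modify p.1 [] (fun l => l ++ [p.2])) PySem.Dict.empty := by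
    rw [List.foldl_map]
  rw [hfold]
  set pairs := data.map (fun r => (r.2.2.2, (r.1, r.2.1, r.2.2.1))) with hpairs
  set D := pairs.foldl (fun (d : PySem.Dict Int (List (String × String × String))) (p : Int × String × String × String) =>
    d.modify p.1 [] (fun l => l ++ [p.2])) PySem.Dict.empty with hD
  have hnodup : D.keys.Nodup := by
    rw [hD]
    exact PySem.Dict.nodup_keys_foldl_modify_key pairs (fun p => p.1) []
      (fun _ p l => l ++ [p.2]) PySem.Dict.empty (by simp [PySem.Dict.empty, PySem.Dict.keys])
  have hkeys : D.keys = PySem.List.dedup (data.map (fun r => r.2.2.2)) := by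
    rw [hD]
    have := PySem.Dict.keys_foldl_modify_key pairs (fun p => p.1) []
      (fun _ p l => l ++ [p.2]) (PySem.Dict.empty (κ := Int) (ν := List (String × String × String)))
    rw [this]
    simp [PySem.Dict.empty, PySem.Dict.keys, hpairs, List.map_map, PySem.Set.update,
      ← PySem.Set.ofList_eq_foldl]
    rfl
  have hget : ∀ i : Int, D.getD i [] = (data.filter (fun r => r.2.2.2 == i)).map (fun r => (r.1, r.2.1, r.2.2.1)) := by
    intro i
    rw [hD, PySem.Dict.getD_foldl_modify_append]
    simp [PySem.Dict.getD, PySem.Dict.get?, PySem.Dict.empty, hpairs, List.filter_map,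
      Function.comp_def]
  rw [PySem.Dict.items_eq_map_keys D hnodup [], hkeys]
  exact List.map_congr_left (fun i _ => by rw [hget i])

-- ===== VERDICT (by name: the statement is the Claim_ definition above) =====
theorem aggregate_baskets_spec : Claim_equal_aggregate_baskets := by
  intro data _
  unfold Spec_aggregate_baskets aggregate_baskets aggregate_baskets_alt
  have hstep : (fun (acc : PySem.Dict Int (List (String × String × String)) × PySem.Set (String × String × String)) (row : String × String × String × Int) =>
      match row with
      | (name, category, department, basket_id) =>
        let baskets := acc.1.setdefault basket_id []
        let product := (name, category, department)
        let products := PySem.Set.add acc.2 product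
        let baskets := baskets.modify basket_id [] (fun l => l ++ [product])
        (baskets, products))
      = (fun acc row =>
        ((fun (d : PySem.Dict Int (List (String × String × String))) (row : String × String × String × Int) =>
            d.modify row.2.2.2 [] (fun l => l ++ [(row.1, row.2.1, row.2.2.1)])) acc.1 row,
         (fun (s : PySem.Set (String × String × String)) (row : String × String × String × Int) =>
            PySem.Set.add s (row.1, row.2.1, row.2.2.1)) acc.2 row)) := by
    funext acc row
    obtain ⟨n, c, dep, bid⟩ := row
    simp [setdefault_modify]
  rw [hstep,
    foldl_pair
      (fun (d : PySem.Dict Int (List (String × String × String))) (row : String × String × String × Int) =>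
        d.modify row.2.2.2 [] (fun l => l ++ [(row.1, row.2.1, row.2.2.1)]))
      (fun (s : PySem.Set (String × String × String)) (row : String × String × String × Int) =>
        PySem.Set.add s (row.1, row.2.1, row.2.2.1))]
  simp only [items_group_loop, PySem.Set.ofList, List.foldl_map]
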